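-- pv_equiv track=rewrite | github.com/Jaaaaabin/DesignHealingWu | data/30_analyze_model/save/save_networkx.py | build_guid_edges
-- ===== SOURCE A (Python) =====
-- def flatten(list):
--     return [item for sublist in list for item in sublist]
--
-- def build_guid_edges(lst_host,lst_targets):
--
--     all_edges = []
--     if len(lst_host) != len(lst_targets):
--         return all_edges
--     else:
--         for host,targets in zip(lst_host,lst_targets):
--             edges_per_host = []
--             actual_targets = [tt for tt in targets if (tt != host[0] and tt)]
--             edges_per_host = [[host[0],target] for target in actual_targets]
--             all_edges.append(edges_per_host)
--
--     all_edges = flatten(all_edges)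
--     all_edges = [sorted(x, key = lambda x:x[0]) for x in all_edges]
--     all_edges = [list(i) for i in set(map(tuple, all_edges))]
--     return all_edges
-- ===== SOURCE B (Python) =====
-- def build_guid_edges(lst_host, lst_targets):
--     # Single pass: accumulate each oriented edge directly into an order-preserving
--     # dedup (seen set + output list); no intermediate per-host lists, no flatten,
--     # no per-pair sort call.
--     if len(lst_host) != len(lst_targets):
--         return []
--     seen = set()
--     out = []
--     for host, targets in zip(lst_host, lst_targets):
--         for target in targets:
--             if target and target != host[0]:
--                 edge = [host[0], target] if host[0][0] <= target[0] else [target, host[0]]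
--                 key = tuple(edge)
--                 if key not in seen:
--                     seen.add(key)
--                     out.append(edge)
--     return out
-- ===== Notes on version B (the rewrite author's own statement) =====
-- stated objective: simpler
-- what changed: A builds per-host edge lists, flattens them, re-sorts every pair with a key function, and deduplicates through a set at the end; B is one fused pass over zip(lst_host, lst_targets) that orients each edge directly by comparing first characters and deduplicates on the fly with a seen-set plus insertion-ordered output list.
import Mathlib
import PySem

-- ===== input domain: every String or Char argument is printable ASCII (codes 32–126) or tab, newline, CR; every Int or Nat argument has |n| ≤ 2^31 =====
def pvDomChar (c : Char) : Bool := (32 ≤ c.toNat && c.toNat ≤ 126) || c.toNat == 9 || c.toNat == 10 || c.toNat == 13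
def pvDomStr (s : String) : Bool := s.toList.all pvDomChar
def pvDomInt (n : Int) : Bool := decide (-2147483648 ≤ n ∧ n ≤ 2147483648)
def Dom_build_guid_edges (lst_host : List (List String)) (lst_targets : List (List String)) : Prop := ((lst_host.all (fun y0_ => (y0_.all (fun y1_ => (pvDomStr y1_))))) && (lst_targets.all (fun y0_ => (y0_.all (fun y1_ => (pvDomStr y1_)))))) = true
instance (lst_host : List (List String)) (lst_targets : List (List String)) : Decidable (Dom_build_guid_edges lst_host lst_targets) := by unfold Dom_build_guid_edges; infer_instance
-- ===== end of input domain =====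

-- B replaces A's staged build/flatten/sort-each-pair/set-dedup pipeline by one fused pass that
-- orients each edge directly and deduplicates in insertion order (objective: simpler).


-- ===== PORT A =====
-- flatten(list) = [item for sublist in list for item in sublist]
def pyFlatten (l : List (List (List String))) : List (List String) := l.flatMap id

-- host[0] and the sort key x[0] are IndexError sites in Python; their total forms
-- (headD "" / toList.headD ' ') are used here and the raising inputs are excluded by
-- Pre_build_guid_edges.  Python iterates the final 'set(...)' in hash order, which is not
-- modelled; the port lists the set in first-insertion order (PySem.Set) — output compared as a set.
def build_guid_edges (lst_host : List (List String)) (lst_targets : List (List String)) : List (List String) :=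
  if lst_host.length ≠ lst_targets.length then []
  else
    let all_edges := (lst_host.zip lst_targets).map (fun ht =>
      ((ht.2.filter (fun tt => tt ≠ ht.1.headD "" && tt ≠ "")).map (fun target => [ht.1.headD "", target])))
    let flat := pyFlatten all_edges
    let srt := flat.map (fun x => PySem.List.sorted x (fun s => s.toList.headD ' ') false)
    (PySem.Set.ofList srt).map id

-- ===== PORT B =====
-- the oriented edge for host GUID h0 and target t:  [h0,t] if h0[0] <= t[0] else [t,h0]
def edgeOf (h0 t : String) : List String :=
  if h0.toList.headD ' ' ≤ t.toList.headD ' ' then [h0, t] else [t, h0]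

-- body of B's inner loop: state = (seen, out)
def stepB (h0 : String) (st : PySem.Set (List String) × List (List String)) (target : String) :
    PySem.Set (List String) × List (List String) :=
  if target ≠ "" && target ≠ h0 then
    let edge := edgeOf h0 target
    if st.1.contains edge then st
    else (PySem.Set.add st.1 edge, st.2 ++ [edge])
  else st

def build_guid_edges_alt (lst_host : List (List String)) (lst_targets : List (List String)) : List (List String) :=
  if lst_host.length ≠ lst_targets.length then []
  else
    ((lst_host.zip lst_targets).foldl
      (fun st ht => ht.2.foldl (stepB (ht.1.headD "")) st)
      ((PySem.Set.empty : PySem.Set (List String)), ([] : List (List String)))).2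

-- ===== PRECONDITION & SPEC =====
-- Pre_ excludes exactly the inputs where Python A raises IndexError (host[0] on an empty host list
-- whose target list is non-empty, or the sort key ""[0] when the host GUID is "" and some target
-- forms an edge).
def Pre_build_guid_edges (lst_host : List (List String)) (lst_targets : List (List String)) : Prop :=
  lst_host.length = lst_targets.length →
    ∀ ht ∈ lst_host.zip lst_targets,
      (ht.2 ≠ [] → ht.1 ≠ []) ∧
      ((∃ t ∈ ht.2, t ≠ "" ∧ t ≠ ht.1.headD "") → ht.1.headD "" ≠ "")
instance (lst_host : List (List String)) (lst_targets : List (List String)) : Decidable (Pre_build_guid_edges lst_host lst_targets) := by unfold Pre_build_guid_edges; infer_instance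

def pvWitness_build_guid_edges : List (List String) × List (List String) :=
  ([["a", "x"], ["b"]], [["b", "c", ""], ["a", "b"]])

def Spec_build_guid_edges (lst_host : List (List String)) (lst_targets : List (List String)) (out : List (List String)) : Prop := out = build_guid_edges_alt lst_host lst_targets
instance (lst_host : List (List String)) (lst_targets : List (List String)) (out : List (List String)) : Decidable (Spec_build_guid_edges lst_host lst_targets out) := by unfold Spec_build_guid_edges; infer_instance

-- ===== CLAIM (what is proved, stated in full; the proofs are below) =====
def Claim_equal_build_guid_edges : Prop := ∀ (lst_host : List (List String)) (lst_targets : List (List String)), Dom_build_guid_edges lst_host lst_targets → Pre_build_guid_edges lst_host lst_targets → Spec_build_guid_edges lst_host lst_targets (build_guid_edges lst_host lst_targets)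

-- ===== LEMMAS AND PROOFS =====

-- the deduplicated edge stream both programs generate, host pair by host pair
def edgesOf (zl : List (List String × List String)) : List (List String) :=
  zl.flatMap (fun ht =>
    (ht.2.filter (fun t => t ≠ "" && t ≠ ht.1.headD "")).map (edgeOf (ht.1.headD "")))

-- A's per-pair stable sort by first character equals B's direct orientation
lemma sorted_pair (h0 t : String) :
    PySem.List.sorted [h0, t] (fun s => s.toList.headD ' ') false = edgeOf h0 t := by
  rw [PySem.List.sorted_eq_foldl_insertBy]
  simp only [List.foldl_cons, List.foldl_nil, PySem.List.insertBy, edgeOf]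
  split_ifs with h1 h2 h2
  · exact absurd h2 (not_le.mpr (of_decide_eq_true h1))
  · rfl
  · rfl
  · exact absurd (not_lt.mp (fun hl => h1 (decide_eq_true hl))) h2

-- one step of B from a synchronized state (seen = out) stays synchronized and is Set.add
lemma stepB_sync (h0 t : String) (s : PySem.Set (List String)) :
    stepB h0 (s, s) t =
      (if t ≠ "" && t ≠ h0
       then (PySem.Set.add s (edgeOf h0 t), PySem.Set.add s (edgeOf h0 t))
       else (s, s)) := by
  unfold stepB
  by_cases hg : (t ≠ "" && t ≠ h0) = true
  · rw [if_pos hg, if_pos hg]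
    by_cases hm : edgeOf h0 t ∈ s
    · rw [if_pos ((PySem.Set.contains_iff s _).mpr hm), PySem.Set.add_of_mem hm]
    · have hc : ¬ s.contains (edgeOf h0 t) = true := fun h => hm ((PySem.Set.contains_iff s _).mp h)
      rw [if_neg hc, PySem.Set.add_of_not_mem hm]
  · rw [if_neg hg, if_neg hg]

-- B's inner loop over one target list = Set.update with that host's edge list
lemma innerB (h0 : String) (l : List String) (s : PySem.Set (List String)) :
    l.foldl (stepB h0) (s, s)
      = (PySem.Set.update s ((l.filter (fun t => t ≠ "" && t ≠ h0)).map (edgeOf h0)),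
         PySem.Set.update s ((l.filter (fun t => t ≠ "" && t ≠ h0)).map (edgeOf h0))) := by
  induction l generalizing s with
  | nil => simp [PySem.Set.update]
  | cons t l ih =>
    rw [List.foldl_cons, stepB_sync]
    by_cases hg : (t ≠ "" && t ≠ h0) = true
    · rw [if_pos hg]
      rw [List.filter_cons, if_pos hg, List.map_cons, PySem.Set.update_cons]
      exact ih (PySem.Set.add s (edgeOf h0 t))
    · rw [if_neg hg]
      rw [List.filter_cons, if_neg hg]
      exact ih s

-- B's outer loop = Set.update with the whole edge stream
lemma outerB (zl : List (List String × List String)) (s : PySem.Set (List String)) :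
    zl.foldl (fun st ht => ht.2.foldl (stepB (ht.1.headD "")) st) (s, s)
      = (PySem.Set.update s (edgesOf zl), PySem.Set.update s (edgesOf zl)) := by
  induction zl generalizing s with
  | nil => simp [edgesOf, PySem.Set.update]
  | cons ht zl ih =>
    rw [List.foldl_cons, innerB]
    simp only [edgesOf, List.flatMap_cons, PySem.Set.update_append]
    exact ih _

-- A's flattened, pair-sorted list is exactly the same edge stream
lemma A_stream (zl : List (List String × List String)) :
    ((pyFlatten (zl.map (fun ht =>
        ((ht.2.filter (fun tt => tt ≠ ht.1.headD "" && tt ≠ "")).map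
          (fun target => [ht.1.headD "", target]))))).map
      (fun x => PySem.List.sorted x (fun s => s.toList.headD ' ') false))
      = edgesOf zl := by
  induction zl with
  | nil => rfl
  | cons ht zl ih =>
    simp only [pyFlatten, List.map_cons, List.flatMap_cons, id, List.map_append, edgesOf] at *
    rw [ih]
    congr 1
    rw [List.map_map]
    have hf : ht.2.filter (fun tt => tt ≠ ht.1.headD "" && tt ≠ "")
        = ht.2.filter (fun t => t ≠ "" && t ≠ ht.1.headD "") :=
      List.filter_congr (fun t _ => by rw [Bool.and_comm])
    rw [hf]
    exact List.map_congr_left (fun t _ => sorted_pair _ t)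

-- ===== VERDICT (by name: the statement is the Claim_ definition above) =====
theorem build_guid_edges_spec : Claim_equal_build_guid_edges := by
  intro lst_host lst_targets _ _
  unfold Spec_build_guid_edges build_guid_edges build_guid_edges_alt
  by_cases hlen : lst_host.length ≠ lst_targets.length
  · rw [if_pos hlen, if_pos hlen]
  · rw [if_neg hlen, if_neg hlen]
    dsimp only
    rw [A_stream, List.map_id,
        show (PySem.Set.empty : PySem.Set (List String)) = [] from rfl,
        outerB, PySem.Set.update_nil_left]
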